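-- pv_equiv track=rewrite | github.com/iswanulumam/cp-alta | 1-adhock/2-check-ab/solution.py | checkAB
-- ===== SOURCE A (Python) =====
-- def checkAB(str):
--   ab = [[], []]
--
--   for i in range(0, len(str)):
--     if str[i] == 'a':
--       ab[0].append(i)
--     elif str[i] == 'b':
--       ab[1].append(i)
--
--   for i in ab[0]:
--     for j in ab[1]:
--       if abs(i - j) == 4:
--         return True
--   return False
-- ===== SOURCE B (Python) =====
-- def checkAB(str):
--   for i in range(len(str) - 4):
--     c, d = str[i], str[i + 4]
--     if (c == 'a' and d == 'b') or (c == 'b' and d == 'a'):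
--       return True
--   return False
-- ===== Notes on version B (the rewrite author's own statement) =====
-- stated objective: faster
-- what changed: Replaces A's build-two-index-lists-then-nested-pairwise-scan with a single linear pass that tests whether the two characters four positions apart form the target unordered letter pair.
import Mathlib
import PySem

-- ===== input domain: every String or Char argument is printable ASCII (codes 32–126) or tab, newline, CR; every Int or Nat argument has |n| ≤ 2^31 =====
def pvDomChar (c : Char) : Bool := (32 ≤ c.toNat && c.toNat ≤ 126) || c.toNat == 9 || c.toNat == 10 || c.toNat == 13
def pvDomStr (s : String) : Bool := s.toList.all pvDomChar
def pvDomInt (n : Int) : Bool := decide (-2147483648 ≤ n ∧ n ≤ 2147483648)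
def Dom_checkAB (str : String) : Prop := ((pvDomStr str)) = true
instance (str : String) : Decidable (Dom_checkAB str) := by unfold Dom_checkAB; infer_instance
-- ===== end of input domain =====

-- B replaces A's two index lists + nested pairwise scan by one linear pass over a window of
-- width 4 (objective: faster, O(n) instead of O(n^2)).

-- ===== PORT A =====
def checkAB (str : String) : Bool :=
  let ab : List Int × List Int :=
    (PySem.List.pyRange 0 (PySem.Str.len str)).foldl
      (fun ab i =>
        if PySem.Str.pyGet? str i = some 'a' then (ab.1 ++ [i], ab.2)
        else if PySem.Str.pyGet? str i = some 'b' then (ab.1, ab.2 ++ [i])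
        else ab)
      ([], [])
  ab.1.any (fun i => ab.2.any (fun j => (i - j).natAbs == 4))

-- ===== PORT B =====
def checkAB_alt (str : String) : Bool :=
  (PySem.List.pyRange 0 (PySem.Str.len str - 4)).any (fun i =>
    let c := PySem.Str.pyGet? str i
    let d := PySem.Str.pyGet? str (i + 4)
    (c == some 'a' && d == some 'b') || (c == some 'b' && d == some 'a'))

-- ===== PRECONDITION & SPEC =====
def Spec_checkAB (str : String) (out : Bool) : Prop := out = checkAB_alt str
instance (str : String) (out : Bool) : Decidable (Spec_checkAB str out) := by unfold Spec_checkAB; infer_instance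

-- ===== CLAIM (what is proved, stated in full; the proofs are below) =====
def Claim_equal_checkAB : Prop := ∀ (str : String), Dom_checkAB str → Spec_checkAB str (checkAB str)

-- ===== LEMMAS AND PROOFS =====

theorem checkAB_fold_eq (l : List Char) (n : Nat) :
    ∀ (acc : List Int × List Int),
    (PySem.List.pyRange 0 (n : Int)).foldl
      (fun ab i =>
        if PySem.Chars.pyGet? l i = some 'a' then (ab.1 ++ [i], ab.2)
        else if PySem.Chars.pyGet? l i = some 'b' then (ab.1, ab.2 ++ [i])
        else ab)
      acc
    = (acc.1 ++ List.map Int.ofNat ((List.range n).filter (fun k => l[k]? = some 'a')),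
       acc.2 ++ List.map Int.ofNat ((List.range n).filter (fun k => l[k]? = some 'b'))) := by
  induction n with
  | zero => intro acc; simp [PySem.List.pyRange_one_eq_nil]
  | succ n ih =>
    intro acc
    have hsplit : PySem.List.pyRange 0 ((n + 1 : Nat) : Int)
        = PySem.List.pyRange 0 (n : Int) ++ [(n : Int)] := by
      have := PySem.List.pyRange_one_succ_right (a := 0) (b := (n : Int)) (by positivity)
      push_cast
      exact this
    rw [hsplit, List.foldl_append, ih]
    have hcast : PySem.Chars.pyGet? l ((n : Nat) : Int) = l[n]? := by
      simp [PySem.List.pyGet?_natCast]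
    simp only [List.foldl_cons, List.foldl_nil, hcast, List.range_succ, List.filter_append,
      List.filter_cons, List.filter_nil]
    by_cases ha : l[n]? = some 'a'
    · simp [ha]
    · by_cases hb : l[n]? = some 'b'
      · simp [hb]
      · simp [ha, hb]

theorem checkAB_iff (s : String) :
    checkAB s = true ↔
      ∃ k j : Nat, k < s.toList.length ∧ j < s.toList.length ∧
        s.toList[k]? = some 'a' ∧ s.toList[j]? = some 'b' ∧
        ((k : Int) - (j : Int)).natAbs = 4 := by
  have h : checkAB s =
      (let ab := (PySem.List.pyRange 0 ((s.toList.length : Nat) : Int)).foldl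
        (fun ab i =>
          if PySem.Chars.pyGet? s.toList i = some 'a' then (ab.1 ++ [i], ab.2)
          else if PySem.Chars.pyGet? s.toList i = some 'b' then (ab.1, ab.2 ++ [i])
          else ab)
        ([], []);
       ab.1.any (fun i => ab.2.any (fun j => (i - j).natAbs == 4))) := by
    simp only [checkAB, PySem.Str.len_eq, PySem.Str.pyGet?_eq]
    rfl
  rw [h]
  simp only [checkAB_fold_eq]
  simp only [List.nil_append, List.any_eq_true, List.mem_map, List.mem_filter,
    List.mem_range, beq_iff_eq]
  constructor
  · rintro ⟨i, ⟨k, ⟨hk, hka⟩, rfl⟩, j, ⟨m, ⟨hm, hmb⟩, rfl⟩, h4⟩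
    exact ⟨k, m, hk, hm, by simpa using hka, by simpa using hmb, h4⟩
  · rintro ⟨k, j, hk, hj, hka, hjb, h4⟩
    exact ⟨Int.ofNat k, ⟨k, ⟨hk, by simpa using hka⟩, rfl⟩,
      ⟨Int.ofNat j, ⟨j, ⟨hj, by simpa using hjb⟩, rfl⟩, by simpa using h4⟩⟩

theorem checkAB_alt_iff (s : String) :
    checkAB_alt s = true ↔
      ∃ i : Int, 0 ≤ i ∧ i < (s.toList.length : Int) - 4 ∧
        ((PySem.Str.pyGet? s i = some 'a' ∧ PySem.Str.pyGet? s (i + 4) = some 'b') ∨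
         (PySem.Str.pyGet? s i = some 'b' ∧ PySem.Str.pyGet? s (i + 4) = some 'a')) := by
  unfold checkAB_alt
  rw [PySem.Str.len_eq]
  simp only [List.any_eq_true, PySem.List.mem_pyRange_one, Bool.or_eq_true, Bool.and_eq_true,
    beq_iff_eq]
  constructor
  · rintro ⟨i, ⟨h0, hlt⟩, h⟩; exact ⟨i, h0, hlt, h⟩
  · rintro ⟨i, h0, hlt, h⟩; exact ⟨i, ⟨h0, hlt⟩, h⟩

-- ===== VERDICT (by name: the statement is the Claim_ definition above) =====
theorem checkAB_spec : Claim_equal_checkAB := by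
  intro str _
  unfold Spec_checkAB
  rw [Bool.eq_iff_iff, checkAB_iff, checkAB_alt_iff]
  set l := str.toList with hl
  constructor
  · rintro ⟨k, j, hk, hj, hka, hjb, h4⟩
    have h4' : (k : Int) - j = 4 ∨ (j : Int) - k = 4 := by omega
    rcases h4' with h | h
    · -- k = j + 4 : window starting at j, pair ('b','a')
      have hkj : k = j + 4 := by omega
      refine ⟨(j : Int), by positivity, by omega, Or.inr ⟨?_, ?_⟩⟩
      · simpa using hjb
      · have : (j : Int) + 4 = ((j + 4 : Nat) : Int) := by push_cast; ring
        rw [this, PySem.Str.pyGet?_natCast, ← hkj]; simpa using hka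
    · -- j = k + 4 : window starting at k, pair ('a','b')
      have hjk : j = k + 4 := by omega
      refine ⟨(k : Int), by positivity, by omega, Or.inl ⟨?_, ?_⟩⟩
      · simpa using hka
      · have : (k : Int) + 4 = ((k + 4 : Nat) : Int) := by push_cast; ring
        rw [this, PySem.Str.pyGet?_natCast, ← hjk]; simpa using hjb
  · rintro ⟨i, h0, hlt, h⟩
    obtain ⟨m, rfl⟩ := Int.eq_ofNat_of_zero_le h0
    have hcast : (m : Int) + 4 = ((m + 4 : Nat) : Int) := by push_cast; ring
    rw [hcast, PySem.Str.pyGet?_natCast, PySem.Str.pyGet?_natCast] at h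
    rcases h with ⟨ha, hb⟩ | ⟨hb, ha⟩
    · exact ⟨m, m + 4, by omega, by omega, by simpa using ha, by simpa using hb, by omega⟩
    · exact ⟨m + 4, m, by omega, by omega, by simpa using ha, by simpa using hb, by omega⟩
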